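-- pv_equiv track=rewrite | github.com/GeneralLi95/leetcode | Python/lccup2022spring-2.py | perfectMenu
-- ===== SOURCE A (Python) =====
-- from typing import List,  Optional
-- from itertools import product,combinations,permutations,accumulate
--
-- def perfectMenu(materials: List[int], cookbooks: List[List[int]], attribute: List[List[int]], limit: int) -> int:
-- 	length = len(cookbooks)
-- 	truth_table = set(product([0, 1], repeat=length))
-- 	result = []
--
-- 	for meal in truth_table:
-- 		mt = materials[:]
-- 		baofu = 0
-- 		meiwei = 0
-- 		for i in range(len(meal)):
-- 			if meal[i] == 0:
-- 				pass
-- 			if meal[i] == 1: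
-- 				for j in range(5):
-- 					mt[j] -= cookbooks[i][j]
-- 				baofu += attribute[i][1]
-- 				meiwei += attribute[i][0]
-- 		if min(mt) >= 0 and baofu >= limit:
-- 			result.append(meiwei)
-- 	if len(result) > 0:
-- 		return max(result)
-- 	else:
-- 		return -1
-- ===== SOURCE B (Python) =====
-- def perfectMenu(materials, cookbooks, attribute, limit):
--     # Recursive backtracking DFS over the cookbook list instead of materializing all 2^n masks.
--     def dfs(items, mt, satiety, taste):
--         if not items:
--             if min(mt) >= 0 and satiety >= limit:
--                 return taste
--             return None
--         cb, at = items[0]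
--         rest = items[1:]
--         skip = dfs(rest, mt, satiety, taste)
--         mt2 = [mt[j] - cb[j] for j in range(5)] + mt[5:]
--         take = dfs(rest, mt2, satiety + at[1], taste + at[0])
--         if skip is None:
--             return take
--         if take is None:
--             return skip
--         return max(skip, take)
--     best = dfs(list(zip(cookbooks, attribute)), materials, 0, 0)
--     return -1 if best is None else best
-- ===== Notes on version B (the rewrite author's own statement) =====
-- stated objective: alternative
-- what changed: Replaces A's materialization of all 2^n bitmask tuples (set(product([0,1],repeat=n))) and its per-mask indexed re-scan with a recursive skip/take backtracking DFS over the zipped cookbook/attribute list that threads the running (materials, satiety, taste) state and combines branches with an optional max.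
import Mathlib
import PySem

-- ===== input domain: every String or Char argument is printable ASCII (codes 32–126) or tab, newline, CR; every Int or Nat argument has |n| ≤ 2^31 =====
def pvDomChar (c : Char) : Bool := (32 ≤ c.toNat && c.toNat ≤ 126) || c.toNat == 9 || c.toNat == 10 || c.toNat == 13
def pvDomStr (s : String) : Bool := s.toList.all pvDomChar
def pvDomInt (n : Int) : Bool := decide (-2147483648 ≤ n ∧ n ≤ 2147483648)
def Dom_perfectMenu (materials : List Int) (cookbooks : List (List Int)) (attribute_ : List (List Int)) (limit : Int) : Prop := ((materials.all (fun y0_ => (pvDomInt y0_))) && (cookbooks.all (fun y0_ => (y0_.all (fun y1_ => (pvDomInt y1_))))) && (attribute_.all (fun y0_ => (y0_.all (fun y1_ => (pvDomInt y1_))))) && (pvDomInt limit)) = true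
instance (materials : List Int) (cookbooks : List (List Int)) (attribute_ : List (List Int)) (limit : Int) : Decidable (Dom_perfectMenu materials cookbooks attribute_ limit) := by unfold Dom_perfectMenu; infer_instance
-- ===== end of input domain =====

-- B replaces A's materialization of all 2^n bitmask tuples by a recursive skip/take DFS over
-- the zipped cookbook/attribute list (objective: alternative decomposition, same exponential cost).

-- ===== PORT A =====

-- itertools.product([0, 1], repeat=n), in itertools order
def prodRep : Nat → List (List Int)
  | 0 => [[]]
  | n + 1 => ([0, 1] : List Int).flatMap (fun b => (prodRep n).map (b :: ·))

-- the inner 'for i in range(len(meal))' loop of A, threading (mt, baofu, meiwei)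
def aMealState (materials : List Int) (cookbooks attribute_ : List (List Int)) (meal : List Int) : List Int × Int × Int :=
  (List.range meal.length).foldl (fun st i =>
    if meal.getD i 0 = 1 then
      ((List.range 5).foldl (fun m j => m.set j (m.getD j 0 - (cookbooks.getD i []).getD j 0)) st.1,
       st.2.1 + (attribute_.getD i []).getD 1 0,
       st.2.2 + (attribute_.getD i []).getD 0 0)
    else st) (materials, 0, 0)

def perfectMenu (materials : List Int) (cookbooks : List (List Int)) (attribute_ : List (List Int)) (limit : Int) : Int :=
  let length := cookbooks.length
  let truth_table : PySem.Set (List Int) := PySem.Set.ofList (prodRep length)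
  let result : List Int := truth_table.foldl (fun result meal =>
    let st := aMealState materials cookbooks attribute_ meal
    if (match PySem.List.min? st.1 (fun x => x) with | some m => decide (0 ≤ m) | none => false)
        && decide (limit ≤ st.2.1) then result ++ [st.2.2] else result) []
  if 0 < result.length then
    match PySem.List.max? result (fun x => x) with
    | some v => v
    | none => -1
  else -1

-- ===== PORT B =====

-- dfs(items, mt, satiety, taste) of Source B; mt[5:] is List.drop 5 (exact: index nonnegative)
def dfsB (limit : Int) : List (List Int × List Int) → List Int → Int → Int → Option Int
  | [], mt, satiety, taste =>
      if (match PySem.List.min? mt (fun x => x) with | some m => decide (0 ≤ m) | none => false)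
          && decide (limit ≤ satiety) then some taste else none
  | (cb, at_) :: rest, mt, satiety, taste =>
      let skip := dfsB limit rest mt satiety taste
      let mt2 := (List.range 5).map (fun j => mt.getD j 0 - cb.getD j 0) ++ mt.drop 5
      let take := dfsB limit rest mt2 (satiety + at_.getD 1 0) (taste + at_.getD 0 0)
      match skip, take with
      | none, x => x
      | some a, none => some a
      | some a, some b => some (max a b)

def perfectMenu_alt (materials : List Int) (cookbooks : List (List Int)) (attribute_ : List (List Int)) (limit : Int) : Int :=
  match dfsB limit (cookbooks.zip attribute_) materials 0 0 with
  | none => -1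
  | some v => v

-- ===== PRECONDITION & SPEC =====
-- Pre_ excludes exactly the inputs on which the Python A raises (IndexError/ValueError):
-- empty materials (min([]) when no cookbook exists), and — as soon as cookbooks is nonempty,
-- so every row is selected by some subset — materials or a cookbook row shorter than 5,
-- fewer attribute rows than cookbooks, or an attribute row (among the first len(cookbooks)) shorter than 2.
def Pre_perfectMenu (materials : List Int) (cookbooks : List (List Int)) (attribute_ : List (List Int)) (limit : Int) : Prop :=
  materials ≠ [] ∧
  (cookbooks = [] ∨
    (5 ≤ materials.length ∧ cookbooks.length ≤ attribute_.length ∧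
     (∀ c ∈ cookbooks, 5 ≤ c.length) ∧
     (∀ a ∈ attribute_.take cookbooks.length, 2 ≤ a.length)))
instance (materials : List Int) (cookbooks : List (List Int)) (attribute_ : List (List Int)) (limit : Int) : Decidable (Pre_perfectMenu materials cookbooks attribute_ limit) := by unfold Pre_perfectMenu; infer_instance

def pvWitness_perfectMenu : List Int × List (List Int) × List (List Int) × Int :=
  ([1, 1, 1, 1, 1], [[1, 0, 0, 0, 0]], [[3, 2]], 1)

def Spec_perfectMenu (materials : List Int) (cookbooks : List (List Int)) (attribute_ : List (List Int)) (limit : Int) (out : Int) : Prop := out = perfectMenu_alt materials cookbooks attribute_ limit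
instance (materials : List Int) (cookbooks : List (List Int)) (attribute_ : List (List Int)) (limit : Int) (out : Int) : Decidable (Spec_perfectMenu materials cookbooks attribute_ limit out) := by unfold Spec_perfectMenu; infer_instance

-- ===== CLAIM (what is proved, stated in full; the proofs are below) =====
def Claim_equal_perfectMenu : Prop := ∀ (materials : List Int) (cookbooks : List (List Int)) (attribute_ : List (List Int)) (limit : Int), Dom_perfectMenu materials cookbooks attribute_ limit → Pre_perfectMenu materials cookbooks attribute_ limit → Spec_perfectMenu materials cookbooks attribute_ limit (perfectMenu materials cookbooks attribute_ limit)

-- ===== LEMMAS AND PROOFS =====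

-- max with identity none, the combiner of dfsB
def omax (a b : Option Int) : Option Int :=
  match a, b with
  | none, x => x
  | some a, none => some a
  | some a, some b => some (max a b)

lemma omax_none_right (a : Option Int) : omax a none = a := by cases a <;> rfl

lemma omax_assoc (a b c : Option Int) : omax (omax a b) c = omax a (omax b c) := by
  cases a <;> cases b <;> cases c <;> simp [omax, max_assoc]

lemma foldl_omax_shift (os : List (Option Int)) (a : Option Int) :
    os.foldl omax a = omax a (os.foldl omax none) := by
  induction os generalizing a with
  | nil => simp [List.foldl, omax_none_right]
  | cons o os ih =>
    simp only [List.foldl_cons]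
    rw [ih (omax a o), ih (omax none o), omax_assoc]
    rfl

-- the leaf value of a final state
def leafV (limit : Int) (st : List Int × Int × Int) : Option Int :=
  if (match PySem.List.min? st.1 (fun x => x) with | some m => decide (0 ≤ m) | none => false)
      && decide (limit ≤ st.2.1) then some st.2.2 else none

-- B's state transformer for taking one item
def updB (cb at_ : List Int) (st : List Int × Int × Int) : List Int × Int × Int :=
  ((List.range 5).map (fun j => st.1.getD j 0 - cb.getD j 0) ++ st.1.drop 5,
   st.2.1 + at_.getD 1 0, st.2.2 + at_.getD 0 0)

-- state after applying a 0/1 mask to the item list, B-style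
def applyB : List (List Int × List Int) → List Int → (List Int × Int × Int) → List Int × Int × Int
  | _, [], st => st
  | [], _ :: _, st => st
  | (cb, at_) :: rest, b :: m, st => applyB rest m (if b = 1 then updB cb at_ st else st)

lemma dfsB_eq (limit : Int) (items : List (List Int × List Int)) (mt : List Int) (s t : Int) :
    dfsB limit items mt s t
      = ((prodRep items.length).map (fun m => leafV limit (applyB items m (mt, s, t)))).foldl omax none := by
  induction items generalizing mt s t with
  | nil => simp [dfsB, prodRep, applyB, leafV, List.foldl, omax]
  | cons it rest ih =>
    obtain ⟨cb, at_⟩ := it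
    show omax (dfsB limit rest mt s t) _ = _
    rw [ih, ih]
    simp only [List.length_cons, prodRep, List.flatMap_cons, List.flatMap_nil,
      List.map_append, List.map_map, List.append_nil, List.foldl_append]
    rw [foldl_omax_shift (a := (List.foldl omax none _))]
    apply congrArg₂ omax <;>
    · apply congrArg (List.foldl omax none)
      apply List.map_congr_left
      intro m _
      simp [applyB, updB]

-- A's state transformer for taking one item
def updA (cb at_ : List Int) (st : List Int × Int × Int) : List Int × Int × Int :=
  ((List.range 5).foldl (fun m j => m.set j (m.getD j 0 - cb.getD j 0)) st.1,
   st.2.1 + at_.getD 1 0, st.2.2 + at_.getD 0 0)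

-- state after applying a mask, A-style (structural counterpart of the indexed loop)
def applyA : List Int → List (List Int) → List (List Int) → (List Int × Int × Int) → List Int × Int × Int
  | [], _, _, st => st
  | _ :: _, [], _, st => st
  | b :: m, cb :: cbs, ats, st =>
      applyA m cbs ats.tail (if b = 1 then updA cb (ats.headD []) st else st)

lemma aMealState_eq (materials : List Int) (cookbooks attribute_ : List (List Int)) (meal : List Int)
    (h : meal.length = cookbooks.length) :
    aMealState materials cookbooks attribute_ meal = applyA meal cookbooks attribute_ (materials, 0, 0) := by
  unfold aMealState
  generalize (materials, (0 : Int), (0 : Int)) = st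
  induction meal generalizing cookbooks attribute_ st with
  | nil => simp [List.range, applyA]
  | cons b m ih =>
    cases cookbooks with
    | nil => simp at h
    | cons cb cbs =>
      have h' : m.length = cbs.length := by simpa using h
      show (List.range (m.length + 1)).foldl _ st = _
      rw [show List.range (m.length + 1) = 0 :: (List.range m.length).map Nat.succ from List.range_succ_eq_map]
      rw [List.foldl_cons, List.foldl_map]
      rw [show applyA (b :: m) (cb :: cbs) attribute_ st
            = applyA m cbs attribute_.tail (if b = 1 then updA cb (attribute_.headD []) st else st) from rfl]
      rw [← ih cbs attribute_.tail h']
      congr 1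
      · funext st' i
        simp only [List.getD_cons_succ]
        cases attribute_ <;> simp [List.getD]
      · simp only [List.getD_cons_zero]
        cases attribute_ <;> simp [updA, List.getD, List.headD]

lemma updA_eq_updB (cb at_ : List Int) (st : List Int × Int × Int) (h : 5 ≤ st.1.length) :
    updA cb at_ st = updB cb at_ st := by
  obtain ⟨mt, s, t⟩ := st
  simp only [updA, updB]
  congr 1
  match mt, h with
  | m0 :: m1 :: m2 :: m3 :: m4 :: rest, _ =>
    simp [List.range_succ, List.getD]

lemma length_updB (cb at_ : List Int) (st : List Int × Int × Int) (h : 5 ≤ st.1.length) :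
    (updB cb at_ st).1.length = st.1.length := by
  simp only [updB, List.length_append, List.length_map, List.length_range, List.length_drop]
  omega

lemma applyA_eq_applyB (meal : List Int) (cbs ats : List (List Int)) (st : List Int × Int × Int)
    (hlen : cbs.length ≤ ats.length) (hmt : 5 ≤ st.1.length) :
    applyA meal cbs ats st = applyB (cbs.zip ats) meal st := by
  induction meal generalizing cbs ats st with
  | nil => cases cbs.zip ats <;> rfl
  | cons b m ih =>
    cases cbs with
    | nil => simp [applyA, applyB]
    | cons cb cbs' =>
      cases ats with
      | nil => simp at hlen
      | cons at_ ats' =>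
        simp only [applyA, List.tail_cons, List.headD_cons, List.zip_cons_cons, applyB]
        rw [updA_eq_updB _ _ _ hmt]
        apply ih
        · simpa using hlen
        · split
          · rw [length_updB _ _ _ hmt]; exact hmt
          · exact hmt

lemma nodup_prodRep (n : Nat) : (prodRep n).Nodup := by
  induction n with
  | zero => simp [prodRep]
  | succ n ih =>
    simp only [prodRep, List.flatMap_cons, List.flatMap_nil, List.append_nil]
    refine (List.Nodup.append (ih.map ?_) (ih.map ?_) ?_)
    · intro x y h; simpa using h
    · intro x y h; simpa using h
    · intro l hl hr
      obtain ⟨x, _, rfl⟩ := List.mem_map.mp hl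
      obtain ⟨y, _, hy⟩ := List.mem_map.mp hr
      simp at hy

lemma length_of_mem_prodRep (n : Nat) (m : List Int) (h : m ∈ prodRep n) : m.length = n := by
  induction n generalizing m with
  | zero => simp [prodRep] at h; simp [h]
  | succ n ih =>
    simp only [prodRep, List.flatMap_cons, List.flatMap_nil, List.append_nil, List.mem_append,
      List.mem_map] at h
    rcases h with ⟨x, hx, rfl⟩ | ⟨x, hx, rfl⟩ <;> simp [ih _ hx]

lemma filter_map_eq_filterMap (l : List (List Int)) (limit : Int) (G : List Int → List Int × Int × Int) :
    ((l.filter (fun m => (match PySem.List.min? (G m).1 (fun x => x) with | some mm => decide (0 ≤ mm) | none => false) && decide (limit ≤ (G m).2.1))).map (fun m => (G m).2.2))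
      = l.filterMap (fun m => leafV limit (G m)) := by
  induction l with
  | nil => rfl
  | cons x l ih =>
    simp only [List.filter_cons, List.filterMap_cons]
    by_cases h : ((match PySem.List.min? (G x).1 (fun x => x) with | some mm => decide (0 ≤ mm) | none => false) && decide (limit ≤ (G x).2.1)) = true
    · simp [h, leafV, ih]
    · simp [h, leafV, ih]

lemma foldl_max_shift (t : List Int) (a b : Int) :
    t.foldl max (max a b) = max a (t.foldl max b) := by
  induction t generalizing b with
  | nil => rfl
  | cons c t ih => simp only [List.foldl_cons, max_assoc, ih]

lemma foldl_omax_eq_max? (os : List (Option Int)) :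
    os.foldl omax none = PySem.List.max? (os.filterMap id) (fun x => x) := by
  induction os with
  | nil => rfl
  | cons o os ih =>
    simp only [List.foldl_cons]
    rw [foldl_omax_shift, ih]
    cases o with
    | none =>
      rw [show List.filterMap id (none :: os) = List.filterMap id os by simp]
      simp [omax]
    | some a =>
      rw [show List.filterMap id (some a :: os) = a :: List.filterMap id os by simp]
      cases hr : os.filterMap id with
      | nil =>
        rw [PySem.List.max?_id_cons]
        simp [PySem.List.max?, omax]
      | cons r t =>
        rw [PySem.List.max?_id_cons, PySem.List.max?_id_cons]
        simp only [omax, List.foldl_cons]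
        rw [foldl_max_shift]

-- assemble the final answer from a list of leaf options
lemma final_match (os : List (Option Int)) :
    (match os.foldl omax none with | none => (-1 : Int) | some v => v)
      = (if 0 < (os.filterMap id).length then
          (match PySem.List.max? (os.filterMap id) (fun x => x) with | some v => v | none => -1)
         else (-1 : Int)) := by
  rw [foldl_omax_eq_max?]
  cases hr : os.filterMap id with
  | nil => simp [PySem.List.max?]
  | cons r t =>
    rw [PySem.List.max?_id_cons]
    simp

-- ===== VERDICT (by name: the statement is the Claim_ definition above) =====
theorem perfectMenu_spec : Claim_equal_perfectMenu := by
  intro materials cookbooks attribute_ limit _ hpre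
  obtain ⟨hm, hrest⟩ := hpre
  unfold Spec_perfectMenu
  simp only [perfectMenu, perfectMenu_alt]
  rw [show PySem.Set.ofList (prodRep cookbooks.length) = prodRep cookbooks.length from
    PySem.Set.ofList_eq_self_of_nodup _ (nodup_prodRep _)]
  have hzlen : (cookbooks.zip attribute_).length = cookbooks.length := by
    rcases hrest with rfl | ⟨_, hle, _, _⟩
    · simp
    · simp [List.length_zip]; omega
  rw [dfsB_eq, hzlen]
  -- rewrite A's result-building fold into filter/map form
  rw [show (fun (result : List Int) meal =>
        let st := aMealState materials cookbooks attribute_ meal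
        if (match PySem.List.min? st.1 (fun x => x) with | some m => decide (0 ≤ m) | none => false)
            && decide (limit ≤ st.2.1) then result ++ [st.2.2] else result)
      = (fun result meal =>
        if (fun m => (match PySem.List.min? (aMealState materials cookbooks attribute_ m).1 (fun x => x) with | some mm => decide (0 ≤ mm) | none => false)
            && decide (limit ≤ (aMealState materials cookbooks attribute_ m).2.1)) meal
        then result ++ [(fun m => (aMealState materials cookbooks attribute_ m).2.2) meal] else result) from rfl]
  rw [PySem.List.foldl_append_if]
  rw [List.nil_append, filter_map_eq_filterMap _ limit]
  -- replace A's indexed state computation by B's structural one, meal by meal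
  have hG : ∀ m ∈ prodRep cookbooks.length,
      aMealState materials cookbooks attribute_ m
        = applyB (cookbooks.zip attribute_) m (materials, 0, 0) := by
    intro m hmem
    rw [aMealState_eq _ _ _ _ (length_of_mem_prodRep _ _ hmem)]
    rcases hrest with rfl | ⟨h5, hle, _, _⟩
    · have : m = [] := by
        have := length_of_mem_prodRep _ _ hmem; simpa [List.length_eq_zero_iff] using this
      subst this; rfl
    · exact applyA_eq_applyB _ _ _ _ hle h5
  rw [List.filterMap_congr (fun m hmem => by rw [hG m hmem])]
  rw [show (prodRep cookbooks.length).filterMap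
        (fun m => leafV limit (applyB (cookbooks.zip attribute_) m (materials, 0, 0)))
      = ((prodRep cookbooks.length).map
        (fun m => leafV limit (applyB (cookbooks.zip attribute_) m (materials, 0, 0)))).filterMap id by
      rw [List.filterMap_map]; rfl]
  rw [← final_match]
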